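-- pv_equiv track=rewrite | github.com/yahya09206/PythonA-Z | Leetcode/valid_palindrome.py | valid_palindrom
-- ===== SOURCE A (Python) =====
-- def valid_palindrom(s:str) -> bool:
--
-- 	l = 0
-- 	r = len(s) - 1
--
-- 	while l < r:
--
-- 		while l < r and not s[l].isalnum():
-- 			l += 1
--
-- 		while l < r and not s[r].isalnum():
-- 			r -= 1
--
-- 		if s[l].lower() != s[r].lower():
-- 			return False
--
-- 		l += 1
-- 		r -= 1
--
-- 	return True
-- ===== SOURCE B (Python) =====
-- def valid_palindrom(s: str) -> bool:
--     cleaned = [c.lower() for c in s if c.isalnum()]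
--     return cleaned == cleaned[::-1]
-- ===== Notes on version B (the rewrite author's own statement) =====
-- stated objective: idiomatic
-- what changed: Replaces the in-place two-pointer skip-scan over raw indices with a build-then-compare decomposition: one forward pass filters alphanumerics and lowercases them, then the cleaned list is compared with its reverse.
import Mathlib
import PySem

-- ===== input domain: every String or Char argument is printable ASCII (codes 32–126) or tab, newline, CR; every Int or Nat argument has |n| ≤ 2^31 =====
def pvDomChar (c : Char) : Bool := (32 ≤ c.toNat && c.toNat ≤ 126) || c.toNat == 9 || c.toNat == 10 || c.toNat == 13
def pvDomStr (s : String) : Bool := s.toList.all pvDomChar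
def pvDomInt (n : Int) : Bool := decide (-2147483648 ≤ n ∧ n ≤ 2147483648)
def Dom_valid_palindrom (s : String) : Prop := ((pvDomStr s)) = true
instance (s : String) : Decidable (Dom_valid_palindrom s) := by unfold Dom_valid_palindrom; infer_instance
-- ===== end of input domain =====

-- B replaces A's two-pointer skip-scan over raw indices by a build-then-compare pass
-- (filtered lowercased list vs its reverse); objective: idiomatic.

-- ===== PORT A =====
-- inner 'while l < r and not s[l].isalnum(): l += 1'
def pvSkipL (cs : List Char) (r : Int) (l : Int) : Int :=
  if l < r ∧ ¬ (PySem.Chars.isalnum (PySem.List.pyGetD cs l ' ')) then pvSkipL cs r (l + 1) else l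
termination_by (r - l).toNat
decreasing_by omega

-- inner 'while l < r and not s[r].isalnum(): r -= 1'
def pvSkipR (cs : List Char) (l : Int) (r : Int) : Int :=
  if l < r ∧ ¬ (PySem.Chars.isalnum (PySem.List.pyGetD cs r ' ')) then pvSkipR cs l (r - 1) else r
termination_by (r - l).toNat
decreasing_by omega

-- bounds on the inner loops, cited by pvLoopA's decreasing_by
theorem le_pvSkipL (cs : List Char) (r l : Int) : l ≤ pvSkipL cs r l := by
  unfold pvSkipL
  split
  · have := le_pvSkipL cs r (l + 1); omega
  · omega
termination_by (r - l).toNat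
decreasing_by omega

theorem pvSkipL_le (cs : List Char) (r l : Int) (h : l ≤ r) : pvSkipL cs r l ≤ r := by
  unfold pvSkipL
  split
  · next hc => exact pvSkipL_le cs r (l + 1) (by omega)
  · exact h
termination_by (r - l).toNat
decreasing_by omega

theorem pvSkipR_le (cs : List Char) (l r : Int) : pvSkipR cs l r ≤ r := by
  unfold pvSkipR
  split
  · have := pvSkipR_le cs l (r - 1); omega
  · omega
termination_by (r - l).toNat
decreasing_by omega

theorem le_pvSkipR (cs : List Char) (l r : Int) (h : l ≤ r) : l ≤ pvSkipR cs l r := by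
  unfold pvSkipR
  split
  · next hc => exact le_pvSkipR cs l (r - 1) (by omega)
  · exact h
termination_by (r - l).toNat
decreasing_by omega

-- outer 'while l < r: …'
def pvLoopA (cs : List Char) (l r : Int) : Bool :=
  if l < r then
    let l' := pvSkipL cs r l
    let r' := pvSkipR cs l' r
    if PySem.Chars.lowerChar (PySem.List.pyGetD cs l' ' ') ≠ PySem.Chars.lowerChar (PySem.List.pyGetD cs r' ' ') then
      false
    else
      pvLoopA cs (l' + 1) (r' - 1)
  else
    true
termination_by (r - l).toNat
decreasing_by
  have h1 := le_pvSkipL cs r l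
  have h2 := pvSkipL_le cs r l (by omega)
  have h3 := pvSkipR_le cs (pvSkipL cs r l) r
  have _h4 := le_pvSkipR cs (pvSkipL cs r l) r h2
  omega

def valid_palindrom (s : String) : Bool :=
  pvLoopA s.toList 0 (PySem.Str.len s - 1)

-- ===== PORT B =====
def valid_palindrom_alt (s : String) : Bool :=
  let cleaned := (s.toList.filter (fun c => PySem.Chars.isalnum c)).map PySem.Chars.lowerChar
  cleaned == cleaned.reverse

-- ===== PRECONDITION & SPEC =====
def Spec_valid_palindrom (s : String) (out : Bool) : Prop := out = valid_palindrom_alt s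
instance (s : String) (out : Bool) : Decidable (Spec_valid_palindrom s out) := by unfold Spec_valid_palindrom; infer_instance

-- ===== CLAIM (what is proved, stated in full; the proofs are below) =====
def Claim_equal_valid_palindrom : Prop := ∀ (s : String), Dom_valid_palindrom s → Spec_valid_palindrom s (valid_palindrom s)

-- ===== LEMMAS AND PROOFS =====

-- inclusive segment cs[l..r] (proof-side only)
def pvSub (cs : List Char) (l r : Int) : List Char :=
  (cs.drop l.toNat).take (r + 1 - l).toNat

-- B's cleaning pass (proof-side name)
def pvClean (t : List Char) : List Char :=
  (t.filter (fun c => PySem.Chars.isalnum c)).map PySem.Chars.lowerChar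

theorem pvSub_cons (cs : List Char) (l r : Int) (h0 : 0 ≤ l) (hlr : l ≤ r)
    (hl : l.toNat < cs.length) :
    pvSub cs l r = cs[l.toNat] :: pvSub cs (l + 1) r := by
  unfold pvSub
  rw [show (r + 1 - l).toNat = (r + 1 - (l + 1)).toNat + 1 by omega,
    List.drop_eq_getElem_cons hl, List.take_succ_cons,
    show (l + 1).toNat = l.toNat + 1 by omega]

theorem pvSub_snoc (cs : List Char) (l r : Int) (h0 : 0 ≤ l) (hlr : l ≤ r)
    (hr : r.toNat < cs.length) :
    pvSub cs l r = pvSub cs l (r - 1) ++ [cs[r.toNat]] := by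
  unfold pvSub
  rw [show (r + 1 - l).toNat = (r - l).toNat + 1 by omega,
    show (r - 1 + 1 - l).toNat = (r - l).toNat by omega, List.take_add_one]
  have hidx : l.toNat + (r - l).toNat = r.toNat := by omega
  rw [List.getElem?_drop, hidx, List.getElem?_eq_getElem hr]
  rfl

theorem pvSub_small (cs : List Char) (l r : Int) (h : r ≤ l) :
    (pvSub cs l r).length ≤ 1 := by
  unfold pvSub
  have h1 : (r + 1 - l).toNat ≤ 1 := by omega
  calc ((cs.drop l.toNat).take (r + 1 - l).toNat).length ≤ (r + 1 - l).toNat := by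
        simp
    _ ≤ 1 := h1

theorem pal_small (t : List Char) (h : t.length ≤ 1) : (t == t.reverse) = true := by
  match t, h with
  | [], _ => simp
  | [a], _ => simp

theorem pal_cons_snoc (a b : Char) (t : List Char) :
    ((a :: (t ++ [b])) == (a :: (t ++ [b])).reverse) = (a == b && (t == t.reverse)) := by
  have hrev : (a :: (t ++ [b])).reverse = b :: (t.reverse ++ [a]) := by simp
  rw [hrev, Bool.eq_iff_iff]
  simp only [beq_iff_eq, Bool.and_eq_true, List.cons.injEq]
  constructor
  · rintro ⟨hab, hts⟩
    subst hab
    exact ⟨rfl, ((List.append_left_inj _).mp hts)⟩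
  · rintro ⟨hab, hts⟩
    subst hab
    exact ⟨rfl, by rw [← hts]⟩

theorem pvSkipL_stop (cs : List Char) (r l : Int)
    (h : ¬ (l < r ∧ ¬ (PySem.Chars.isalnum (PySem.List.pyGetD cs l ' ')))) :
    pvSkipL cs r l = l := by
  rw [pvSkipL, if_neg h]

theorem pvSkipR_stop (cs : List Char) (l r : Int)
    (h : ¬ (l < r ∧ ¬ (PySem.Chars.isalnum (PySem.List.pyGetD cs r ' ')))) :
    pvSkipR cs l r = r := by
  rw [pvSkipR, if_neg h]

theorem pvLoopA_unfold (cs : List Char) (l r : Int) (h : l < r) :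
    pvLoopA cs l r =
      (if PySem.Chars.lowerChar (PySem.List.pyGetD cs (pvSkipL cs r l) ' ') ≠
          PySem.Chars.lowerChar (PySem.List.pyGetD cs (pvSkipR cs (pvSkipL cs r l) r) ' ') then
        false
      else
        pvLoopA cs (pvSkipL cs r l + 1) (pvSkipR cs (pvSkipL cs r l) r - 1)) := by
  rw [pvLoopA, if_pos h]

theorem pvLoopA_true (cs : List Char) (l r : Int) (h : ¬ l < r) : pvLoopA cs l r = true := by
  rw [pvLoopA, if_neg h]

-- A skipped non-alphanumeric on the left leaves the loop's value unchanged
theorem pvLoopA_stepL (cs : List Char) (l r : Int) (hlr : l < r)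
    (ha : PySem.Chars.isalnum (PySem.List.pyGetD cs l ' ') = false) :
    pvLoopA cs l r = pvLoopA cs (l + 1) r := by
  have hskip : pvSkipL cs r l = pvSkipL cs r (l + 1) := by
    rw [pvSkipL, if_pos ⟨hlr, by simp [ha]⟩]
  by_cases h2 : l + 1 < r
  · rw [pvLoopA_unfold cs l r hlr, pvLoopA_unfold cs (l + 1) r h2, hskip]
  · have hr : l + 1 = r := by omega
    rw [pvLoopA_unfold cs l r hlr, hskip, hr,
      pvSkipL_stop cs r r (by simp), pvSkipR_stop cs r r (by simp),
      if_neg (by simp), pvLoopA_true cs (r + 1) (r - 1) (by omega)]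
    exact (pvLoopA_true cs r r (by omega)).symm

-- A skipped non-alphanumeric on the right leaves the loop's value unchanged
theorem pvLoopA_stepR (cs : List Char) (l r : Int) (hlr : l < r)
    (ha : PySem.Chars.isalnum (PySem.List.pyGetD cs l ' ') = true)
    (hb : PySem.Chars.isalnum (PySem.List.pyGetD cs r ' ') = false) :
    pvLoopA cs l r = pvLoopA cs l (r - 1) := by
  have hL : ∀ r' : Int, pvSkipL cs r' l = l := fun r' =>
    pvSkipL_stop cs r' l (by simp [ha])
  have hskip : pvSkipR cs l r = pvSkipR cs l (r - 1) := by
    rw [pvSkipR, if_pos ⟨hlr, by simp [hb]⟩]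
  by_cases h2 : l < r - 1
  · rw [pvLoopA_unfold cs l r hlr, pvLoopA_unfold cs l (r - 1) h2, hL r, hL (r - 1), hskip]
  · have hr : l = r - 1 := by omega
    rw [pvLoopA_unfold cs l r hlr, hL r, hskip, ← hr,
      pvSkipR_stop cs l l (by simp), if_neg (by simp),
      pvLoopA_true cs (l + 1) (l - 1) (by omega)]
    exact (pvLoopA_true cs l l (by omega)).symm

theorem pvClean_len_le (t : List Char) : (pvClean t).length ≤ t.length := by
  unfold pvClean
  simp [List.length_filter_le]

theorem pvLoopA_eq_base (cs : List Char) (l r : Int) (h : ¬ l < r) :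
    pvLoopA cs l r = (pvClean (pvSub cs l r) == (pvClean (pvSub cs l r)).reverse) := by
  rw [pvLoopA_true cs l r h]
  exact (pal_small _ (le_trans (pvClean_len_le _) (pvSub_small cs l r (by omega)))).symm

-- main invariant: the two-pointer loop on cs[l..r] decides palindromality of the cleaned segment
theorem pvLoopA_eq (n : Nat) (cs : List Char) (l r : Int)
    (hn : (r - l).toNat ≤ n) (h0 : 0 ≤ l) (hr : r < (cs.length : Int)) :
    pvLoopA cs l r = (pvClean (pvSub cs l r) == (pvClean (pvSub cs l r)).reverse) := by
  induction n generalizing l r with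
  | zero => exact pvLoopA_eq_base cs l r (by omega)
  | succ n ih =>
    by_cases hlr : l < r
    · have hlN : l.toNat < cs.length := by omega
      have hrN : r.toNat < cs.length := by omega
      have hgl : PySem.List.pyGetD cs l ' ' = cs[l.toNat] :=
        PySem.List.pyGetD_eq_getElem cs ' ' h0 (by omega)
      have hgr : PySem.List.pyGetD cs r ' ' = cs[r.toNat] :=
        PySem.List.pyGetD_eq_getElem cs ' ' (by omega) hr
      by_cases ha : PySem.Chars.isalnum cs[l.toNat]
      · by_cases hb : PySem.Chars.isalnum cs[r.toNat]
        · -- both ends alphanumeric: compare and shrink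
          rw [pvLoopA_unfold cs l r hlr,
            pvSkipL_stop cs r l (by simp [hgl, ha]),
            pvSkipR_stop cs l r (by simp [hgr, hb]), hgl, hgr]
          rw [pvSub_cons cs l r h0 (by omega) hlN,
            pvSub_snoc cs (l + 1) r (by omega) (by omega) hrN]
          simp only [pvClean, List.filter_cons, List.filter_append, ha, hb,
            if_pos, List.map_cons, List.map_append,
            List.map_cons, List.map_nil, List.filter_nil]
          rw [pal_cons_snoc]
          by_cases hcmp : PySem.Chars.lowerChar cs[l.toNat] = PySem.Chars.lowerChar cs[r.toNat]
          · rw [if_neg (by simp [hcmp]), hcmp]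
            simp only [BEq.rfl, Bool.true_and]
            exact ih (l + 1) (r - 1) (by omega) (by omega) (by omega) ▸ rfl
          · rw [if_pos hcmp]
            simp [hcmp]
        · -- right end not alphanumeric: it is skipped and filtered out alike
          rw [pvLoopA_stepR cs l r hlr (by simp [hgl, ha]) (by simp [hgr, hb]),
            ih l (r - 1) (by omega) h0 (by omega),
            pvSub_snoc cs l r h0 (by omega) hrN]
          simp [pvClean, List.filter_append, hb]
      · -- left end not alphanumeric: it is skipped and filtered out alike
        rw [pvLoopA_stepL cs l r hlr (by simp [hgl, ha]),
          ih (l + 1) r (by omega) (by omega) hr,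
          pvSub_cons cs l r h0 (by omega) hlN]
        simp [pvClean, ha]
    · exact pvLoopA_eq_base cs l r hlr

-- ===== VERDICT (by name: the statement is the Claim_ definition above) =====
theorem valid_palindrom_spec : Claim_equal_valid_palindrom := by
  intro s _
  unfold Spec_valid_palindrom valid_palindrom valid_palindrom_alt
  rw [PySem.Str.len_eq,
    pvLoopA_eq s.toList.length s.toList 0 ((s.toList.length : Int) - 1)
      (by omega) (by omega) (by omega)]
  have hsub : pvSub s.toList 0 ((s.toList.length : Int) - 1) = s.toList := by
    unfold pvSub
    rw [show ((0 : Int)).toNat = 0 by rfl, List.drop_zero,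
      show (((s.toList.length : Int) - 1) + 1 - 0).toNat = s.toList.length by omega,
      List.take_length]
  rw [hsub]
  rfl
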